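-- pv_equiv track=rewrite | github.com/n8trium/Advent-Of-Code | 2023/05/part1.py | map_fix
-- ===== SOURCE A (Python) =====
-- def map_fix(map):
--     m_in=[]
--     out=[]
--     range=[]
--     for i in map.split("\n")[1:]:
--         tmp=i.split(" ")
--         if len(tmp)==3:
--             m_in.append(int(tmp[1]))
--             out.append(int(tmp[0]))
--             range.append(int(tmp[2]))
--     return(m_in, out, range, map.split("\n")[0])
-- ===== SOURCE B (Python) =====
-- def map_fix(map):
--     # Single forward pass over the characters: a small state machine that
--     # accumulates the header, the current token and the current line's tokens,
--     # committing a row whenever a finished line had exactly three tokens.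
--     m_in = []
--     out = []
--     rng = []
--     header_done = False
--     header = []
--     tok = []
--     toks = []
--     for ch in map:
--         if not header_done:
--             if ch == "\n":
--                 header_done = True
--             else:
--                 header.append(ch)
--         elif ch == "\n":
--             toks.append("".join(tok))
--             if len(toks) == 3:
--                 m_in.append(int(toks[1]))
--                 out.append(int(toks[0]))
--                 rng.append(int(toks[2]))
--             tok = []
--             toks = []
--         elif ch == " ":
--             toks.append("".join(tok))
--             tok = []
--         else:
--             tok.append(ch)
--     if not header_done:
--         return ([], [], [], map)
--     toks.append("".join(tok))
--     if len(toks) == 3: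
--         m_in.append(int(toks[1]))
--         out.append(int(toks[0]))
--         rng.append(int(toks[2]))
--     return (m_in, out, rng, "".join(header))
-- ===== Notes on version B (the rewrite author's own statement) =====
-- stated objective: alternative
-- what changed: B replaces A's split-into-lines-then-split-each-line processing by a single forward character-level state machine over the raw string that accumulates the header, the current token and the current line's tokens, committing a row at every line end; it never calls split.
import Mathlib
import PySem

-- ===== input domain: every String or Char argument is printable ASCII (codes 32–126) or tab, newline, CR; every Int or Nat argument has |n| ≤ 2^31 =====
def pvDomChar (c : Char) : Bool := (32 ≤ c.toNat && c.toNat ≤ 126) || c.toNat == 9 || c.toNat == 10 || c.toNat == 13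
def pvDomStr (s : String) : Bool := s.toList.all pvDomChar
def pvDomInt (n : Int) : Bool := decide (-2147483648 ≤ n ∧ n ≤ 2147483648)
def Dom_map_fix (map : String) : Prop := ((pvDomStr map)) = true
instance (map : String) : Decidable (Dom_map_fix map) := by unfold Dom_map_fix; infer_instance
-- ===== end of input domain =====

-- B change (objective: alternative): B is a single forward character-level state machine —
-- no split at all — accumulating the header, the current token and the current line's
-- tokens, committing a row at each line end; A splits into lines and tokenizes each line.

-- int(s) on a string already checked to parse (inside Pre_); 0 is never reached inside Pre_
def pvInt (s : String) : Int := (PySem.Int.ofStr? s).getD 0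

-- ===== PORT A =====
-- the body of A's for-loop: three interleaved appends on the (m_in, out, range) state
def pvStep (acc : List Int × List Int × List Int) (i : String) : List Int × List Int × List Int :=
  let tmp := (PySem.Str.split? i " ").getD []
  if tmp.length == 3 then
    (acc.1 ++ [pvInt (tmp.getD 1 "")],
     acc.2.1 ++ [pvInt (tmp.getD 0 "")],
     acc.2.2 ++ [pvInt (tmp.getD 2 "")])
  else acc

def map_fix (map : String) : List Int × List Int × List Int × String :=
  let lines := (PySem.Str.split? map "\n").getD []
  let res := (lines.drop 1).foldl pvStep ([], [], [])
  (res.1, res.2.1, res.2.2, lines.getD 0 "")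

-- ===== PORT B =====
-- int(tok) on the accumulated token chars ("".join(tok)); 0 never reached inside Pre_
def pvIntC (cs : List Char) : Int := (PySem.Int.ofChars? cs).getD 0

-- B's "if len(toks) == 3: append the three parsed fields" commit
def pvCommit (toks : List (List Char)) (acc : List Int × List Int × List Int) :
    List Int × List Int × List Int :=
  if toks.length == 3 then
    (acc.1 ++ [pvIntC (toks.getD 1 [])],
     acc.2.1 ++ [pvIntC (toks.getD 0 [])],
     acc.2.2 ++ [pvIntC (toks.getD 2 [])])
  else acc

-- B's state: (header_done, header, tok, toks, (m_in, out, rng))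
def pvBStep
    (st : Bool × List Char × List Char × List (List Char) × (List Int × List Int × List Int))
    (ch : Char) :
    Bool × List Char × List Char × List (List Char) × (List Int × List Int × List Int) :=
  match st with
  | (headerDone, header, tok, toks, acc) =>
    if headerDone = false then
      if ch = '\n' then (true, header, tok, toks, acc)
      else (false, header ++ [ch], tok, toks, acc)
    else if ch = '\n' then (true, header, [], [], pvCommit (toks ++ [tok]) acc)
    else if ch = ' ' then (true, header, [], toks ++ [tok], acc)
    else (true, header, tok ++ [ch], toks, acc)

def map_fix_alt (map : String) : List Int × List Int × List Int × String :=
  let st := map.toList.foldl pvBStep (false, [], [], [], ([], [], []))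
  if st.1 = false then ([], [], [], map)
  else
    let acc := pvCommit (st.2.2.2.1 ++ [st.2.2.1]) st.2.2.2.2
    (acc.1, acc.2.1, acc.2.2, String.ofList st.2.1)

-- ===== PRECONDITION & SPEC =====
-- Pre_ excludes exactly the inputs on which Python A raises ValueError: a line after the
-- first that splits into exactly 3 space-separated fields one of which int() cannot parse.
def Pre_map_fix (map : String) : Prop :=
  ∀ line ∈ ((PySem.Str.split? map "\n").getD []).drop 1,
    (((PySem.Str.split? line " ").getD []).length = 3 →
      ∀ f ∈ (PySem.Str.split? line " ").getD [], (PySem.Int.ofStr? f).isSome = true)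
instance (map : String) : Decidable (Pre_map_fix map) := by unfold Pre_map_fix; infer_instance

def pvWitness_map_fix : String := "seed-to-soil map:\n50 98 2\n52 50 48"

def Spec_map_fix (map : String) (out : List Int × List Int × List Int × String) : Prop := out = map_fix_alt map
instance (map : String) (out : List Int × List Int × List Int × String) : Decidable (Spec_map_fix map out) := by unfold Spec_map_fix; infer_instance

-- ===== CLAIM (what is proved, stated in full; the proofs are below) =====
def Claim_equal_map_fix : Prop := ∀ (map : String), Dom_map_fix map → Pre_map_fix map → Spec_map_fix map (map_fix map)

-- ===== LEMMAS AND PROOFS =====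

-- modifyHead with the identity changes nothing
theorem modifyHead_id' {α : Type} (l : List α) : List.modifyHead (fun x => x) l = l := by
  cases l <;> simp

-- simple recursive single-character split, the common yardstick of both ports
def sp1 (s : Char) : List Char → List (List Char)
  | [] => [[]]
  | c :: cs => if c = s then [] :: sp1 s cs else (sp1 s cs).modifyHead (c :: ·)

theorem sp1_ne_nil (s : Char) (l : List Char) : sp1 s l ≠ [] := by
  induction l with
  | nil => simp [sp1]
  | cons c cs ih =>
    simp only [sp1]
    split
    · simp
    · cases h : sp1 s cs with
      | nil => exact absurd h ih
      | cons a as => simp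

theorem splitOn_go_eq (s : Char) (fuel : Nat) (l cur : List Char) (acc : List (List Char))
    (h : l.length < fuel) :
    PySem.Chars.splitOn.go [s] fuel l cur acc
      = acc.reverse ++ (sp1 s l).modifyHead (cur.reverse ++ ·) := by
  induction fuel generalizing l cur acc with
  | zero => omega
  | succ f ih =>
    cases l with
    | nil => simp [PySem.Chars.splitOn.go, sp1]
    | cons c cs =>
      rw [PySem.Chars.splitOn.go]
      by_cases hc : c = s
      · subst hc
        have : [c].isPrefixOf (c :: cs) = true := by simp [List.isPrefixOf]
        simp only [this, if_pos, List.length_nil, List.length_cons, List.drop_succ_cons,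
          List.drop_zero]
        rw [ih cs [] (cur.reverse :: acc) (by simpa using h)]
        simp [sp1]
        cases sp1 c cs <;> simp
      · have : [s].isPrefixOf (c :: cs) = false := by
          simp [List.isPrefixOf]
          intro hh; exact absurd hh.symm hc
        simp only [this, Bool.false_eq_true, if_false]
        rw [ih cs (c :: cur) acc (by simpa using h)]
        simp only [sp1, if_neg hc, List.modifyHead_modifyHead]
        cases hsp : sp1 s cs with
        | nil => exact absurd hsp (sp1_ne_nil s cs)
        | cons a as => simp

theorem splitOn_eq_sp1 (s : Char) (l : List Char) :
    PySem.Chars.splitOn l [s] = sp1 s l := by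
  rw [PySem.Chars.splitOn, splitOn_go_eq s (l.length + 1) l [] [] (by omega)]
  cases h : sp1 s l with
  | nil => exact absurd h (sp1_ne_nil s l)
  | cons a as => simp

-- getD through map, inside the length
theorem getD_map_toList (L : List String) (k : Nat) (hk : k < L.length) :
    (L.map String.toList).getD k [] = (L.getD k "").toList := by
  simp [List.getD_eq_getElem?_getD, List.getElem?_eq_getElem hk,
    List.getElem?_eq_getElem (by simpa using hk : k < (L.map String.toList).length)]

-- pvStep on a line string is pvCommit on the line's sp1-tokens
theorem pvStep_eq_commit (acc : List Int × List Int × List Int) (i : String) :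
    pvStep acc i = pvCommit (sp1 ' ' i.toList) acc := by
  have hb := PySem.Str.split?_map i " "
  cases hsp : PySem.Str.split? i " " with
  | none => rw [hsp] at hb; simp [PySem.Chars.split?] at hb
  | some L =>
    rw [hsp] at hb
    simp only [Option.map_some, PySem.Chars.split?] at hb
    have hL : L.map String.toList = sp1 ' ' i.toList := by
      rw [← splitOn_eq_sp1]
      simpa using hb
    have hlen : (sp1 ' ' i.toList).length = L.length := by
      rw [← hL]; simp
    unfold pvStep pvCommit
    rw [hsp]
    simp only [Option.getD_some, ← hL, List.length_map]
    by_cases h3 : L.length = 3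
    · simp only [h3, beq_self_eq_true, if_pos]
      rw [getD_map_toList L 0 (by omega), getD_map_toList L 1 (by omega),
        getD_map_toList L 2 (by omega)]
      simp [pvInt, pvIntC, PySem.Int.ofStr?]
    · simp [h3]

-- phase-2 invariant of B's fold (header already found)
theorem phase2 (cs : List Char) (h tok : List Char) (toks : List (List Char))
    (acc : List Int × List Int × List Int) :
    (cs.foldl pvBStep (true, h, tok, toks, acc)).1 = true ∧
    (cs.foldl pvBStep (true, h, tok, toks, acc)).2.1 = h ∧
    (let st := cs.foldl pvBStep (true, h, tok, toks, acc)
     pvCommit (st.2.2.2.1 ++ [st.2.2.1]) st.2.2.2.2)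
      = ((sp1 '\n' cs).map (sp1 ' ')
          |>.modifyHead (fun ts => toks ++ ts.modifyHead (tok ++ ·))).foldl
            (fun a ts => pvCommit ts a) acc := by
  induction cs generalizing tok toks acc with
  | nil =>
    refine ⟨rfl, rfl, ?_⟩
    simp [sp1]
  | cons c cs ih =>
    by_cases hc : c = '\n'
    · subst hc
      have hstep : pvBStep (true, h, tok, toks, acc) '\n'
          = (true, h, [], [], pvCommit (toks ++ [tok]) acc) := by
        simp [pvBStep]
      rw [List.foldl_cons, hstep]
      obtain ⟨h1, h2, h3⟩ := ih [] [] (pvCommit (toks ++ [tok]) acc)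
      refine ⟨h1, h2, ?_⟩
      rw [h3]
      simp [modifyHead_id', sp1]
    · by_cases hsp : c = ' '
      · subst hsp
        have hstep : pvBStep (true, h, tok, toks, acc) ' '
            = (true, h, [], toks ++ [tok], acc) := by
          simp [pvBStep]
        rw [List.foldl_cons, hstep]
        obtain ⟨h1, h2, h3⟩ := ih [] (toks ++ [tok]) acc
        refine ⟨h1, h2, ?_⟩
        rw [h3]
        obtain ⟨L, Ls, hLL⟩ := List.exists_cons_of_ne_nil (sp1_ne_nil '\n' cs)
        simp only [sp1, if_neg hc, hLL, List.modifyHead_cons, List.map_cons]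
        simp [modifyHead_id', List.append_assoc]
      · have hstep : pvBStep (true, h, tok, toks, acc) c
            = (true, h, tok ++ [c], toks, acc) := by
          simp [pvBStep, hc, hsp]
        rw [List.foldl_cons, hstep]
        obtain ⟨h1, h2, h3⟩ := ih (tok ++ [c]) toks acc
        refine ⟨h1, h2, ?_⟩
        rw [h3]
        obtain ⟨L, Ls, hLL⟩ := List.exists_cons_of_ne_nil (sp1_ne_nil '\n' cs)
        simp only [sp1, if_neg hc, hLL, List.modifyHead_cons, List.map_cons,
          if_neg hsp]
        simp [List.modifyHead_modifyHead, Function.comp_def, List.append_assoc]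

-- phase-1: B scans up to the first newline collecting the header
theorem phase1 (cs : List Char) (hd tok : List Char) (toks : List (List Char))
    (acc : List Int × List Int × List Int) :
    cs.foldl pvBStep (false, hd, tok, toks, acc)
      = if '\n' ∈ cs then
          ((cs.dropWhile (· ≠ '\n')).tail).foldl pvBStep
            (true, hd ++ cs.takeWhile (· ≠ '\n'), tok, toks, acc)
        else (false, hd ++ cs, tok, toks, acc) := by
  induction cs generalizing hd with
  | nil => simp
  | cons c cs ih =>
    by_cases hc : c = '\n'
    · subst hc
      simp [pvBStep]
    · rw [List.foldl_cons]
      have hstep : pvBStep (false, hd, tok, toks, acc) c = (false, hd ++ [c], tok, toks, acc) := by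
        simp [pvBStep, hc]
      rw [hstep, ih]
      simp only [List.mem_cons, List.takeWhile_cons, List.dropWhile_cons]
      have : ('\n' = c ∨ '\n' ∈ cs) ↔ '\n' ∈ cs :=
        or_iff_right (fun h => hc h.symm)
      rw [if_congr this rfl rfl]
      by_cases hm : '\n' ∈ cs
      · simp [hm, hc, List.append_assoc]
      · simp [hm]

-- sp1 splits off the first chunk at the first separator
theorem sp1_decomp (s : Char) (cs : List Char) :
    sp1 s cs = if s ∈ cs then
        cs.takeWhile (· ≠ s) :: sp1 s ((cs.dropWhile (· ≠ s)).tail)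
      else [cs] := by
  induction cs with
  | nil => simp [sp1]
  | cons c cs ih =>
    by_cases hc : c = s
    · subst hc
      simp [sp1]
    · have hm : (s ∈ c :: cs) ↔ s ∈ cs :=
        List.mem_cons.trans (or_iff_right (fun h => hc h.symm))
      by_cases hmem : s ∈ cs
      · simp only [sp1, if_neg hc, ih, if_pos hmem, List.modifyHead_cons,
          List.takeWhile_cons, List.dropWhile_cons]
        simp [hm, hmem, hc]
      · simp only [sp1, if_neg hc, ih, if_neg hmem, List.modifyHead_cons]
        simp [hm, hmem]

-- A's whole fold, rephrased as the commit-fold over sp1 token lists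
theorem A_fold_eq (L : List String) (init : List Int × List Int × List Int) :
    (L.drop 1).foldl pvStep init
      = (((L.map String.toList).drop 1).map (sp1 ' ')).foldl (fun a ts => pvCommit ts a) init := by
  have hps : pvStep = fun a (i : String) => pvCommit (sp1 ' ' i.toList) a :=
    funext fun a => funext fun i => pvStep_eq_commit a i
  rw [← List.map_drop, List.map_map, List.foldl_map, hps]
  rfl

-- ===== VERDICT (by name: the statement is the Claim_ definition above) =====
theorem map_fix_spec : Claim_equal_map_fix := by
  intro map _ _
  unfold Spec_map_fix map_fix map_fix_alt
  have hb := PySem.Str.split?_map map "\n"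
  cases hsp : PySem.Str.split? map "\n" with
  | none => rw [hsp] at hb; simp [PySem.Chars.split?] at hb
  | some L =>
    rw [hsp] at hb
    simp only [Option.map_some, PySem.Chars.split?] at hb
    have hL : L.map String.toList = sp1 '\n' map.toList := by
      rw [← splitOn_eq_sp1]; simpa using hb
    simp only [Option.getD_some, A_fold_eq, hL, phase1]
    by_cases hm : '\n' ∈ map.toList
    · simp only [hm, if_pos]
      obtain ⟨b1, b2, b3⟩ := phase2 ((map.toList.dropWhile (· ≠ '\n')).tail)
        ([] ++ map.toList.takeWhile (· ≠ '\n')) [] [] ([], [], [])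
      have hdec := sp1_decomp '\n' map.toList
      rw [if_pos hm] at hdec
      -- L is nonempty, its head's chars are the takeWhile prefix
      obtain ⟨s0, L', rfl⟩ : ∃ s0 L', L = s0 :: L' := by
        cases L with
        | nil => rw [hdec] at hL; simp at hL
        | cons a as => exact ⟨a, as, rfl⟩
      have hs0 : s0.toList = map.toList.takeWhile (· ≠ '\n') := by
        rw [hdec] at hL
        simpa using congrArg (fun l => l.headD []) hL
      rw [hdec]
      have hhdr : s0 = String.ofList (map.toList.takeWhile (· ≠ '\n')) := by
        apply String.toList_inj.mp; simp [hs0]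
      simp only [ne_eq, decide_not, List.nil_append] at b1 b2 b3 hhdr
      simp [b1, b2, b3, modifyHead_id', ← hhdr]
    · rw [if_neg hm]
      have hdec := sp1_decomp '\n' map.toList
      rw [if_neg hm] at hdec
      obtain ⟨s0, rfl⟩ : ∃ s0, L = [s0] := by
        rw [hdec] at hL
        cases L with
        | nil => simp at hL
        | cons a as =>
          cases as with
          | nil => exact ⟨a, rfl⟩
          | cons b bs => simp at hL
      have hs0 : s0.toList = map.toList := by
        rw [hdec] at hL; simpa using hL
      have : s0 = map := String.toList_inj.mp hs0
      simp [this, hdec]
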